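-- pv_equiv track=rewrite | github.com/eckmannmiles91/SubaruDash | pcb/boards/split_schematic.py | extract_wires_and_labels
-- ===== SOURCE A (Python) =====
-- def extract_wires_and_labels(content):
--     """Extract all wire and label elements."""
--     elements = {
--         'wires': [],
--         'labels': [],
--         'global_labels': [],
--         'power_symbols': [],
--         'junctions': [],
--         'no_connects': [],
--         'bus': [],
--         'bus_entry': [],
--         'polyline': [],
--         'text': [],
--     }
--
--     lines = content.split('\n')
--     current_block = []
--     block_type = None
--     paren_depth = 0
--
--     type_mapping = {
--         '(wire': 'wires',
--         '(label': 'labels',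
--         '(global_label': 'global_labels',
--         '(junction': 'junctions',
--         '(no_connect': 'no_connects',
--         '(bus ': 'bus',
--         '(bus_entry': 'bus_entry',
--         '(polyline': 'polyline',
--         '(text': 'text',
--     }
--
--     for line in lines:
--         if block_type is None:
--             for prefix, btype in type_mapping.items():
--                 if line.strip().startswith(prefix):
--                     block_type = btype
--                     current_block = [line]
--                     paren_depth = line.count('(') - line.count(')')
--                     break
--         else:
--             current_block.append(line)
--             paren_depth += line.count('(') - line.count(')')
--             if paren_depth <= 0:
--                 elements[block_type].append('\n'.join(current_block))
--                 block_type = None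
--                 current_block = []
--
--     return elements
-- ===== SOURCE B (Python) =====
-- def extract_wires_and_labels(content):
--     """Extract all wire and label elements."""
--     type_mapping = {
--         '(wire': 'wires',
--         '(label': 'labels',
--         '(global_label': 'global_labels',
--         '(junction': 'junctions',
--         '(no_connect': 'no_connects',
--         '(bus ': 'bus',
--         '(bus_entry': 'bus_entry',
--         '(polyline': 'polyline',
--         '(text': 'text',
--     }
--     order = ['wires', 'labels', 'global_labels', 'power_symbols', 'junctions',
--              'no_connects', 'bus', 'bus_entry', 'polyline', 'text']
--
--     lines = content.split('\n')
--     n = len(lines)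
--
--     # pass 1: cumulative paren balance; prefix[k] = balance of lines[:k]
--     prefix = [0]
--     total = 0
--     for line in lines:
--         total += line.count('(') - line.count(')')
--         prefix.append(total)
--
--     # pass 2: locate block spans arithmetically, collecting (type, text) pairs
--     blocks = []
--     i = 0
--     while i < n:
--         stripped = lines[i].strip()
--         btype = None
--         for pfx, bt in type_mapping.items():
--             if stripped.startswith(pfx):
--                 btype = bt
--                 break
--         if btype is None:
--             i += 1
--             continue
--         # block spans [i..j], j = first later line where the balance returns to start
--         j = None
--         for k in range(i + 1, n):
--             if prefix[k + 1] - prefix[i] <= 0: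
--                 j = k
--                 break
--         if j is None:
--             break  # unclosed trailing block: nothing more can be emitted
--         blocks.append((btype, '\n'.join(lines[i:j + 1])))
--         i = j + 1
--
--     # pass 3: group the collected blocks per category
--     elements = {k: [] for k in order}
--     for bt, text in blocks:
--         elements[bt].append(text)
--     return elements
-- ===== Notes on version B (the rewrite author's own statement) =====
-- stated objective: alternative
-- what changed: Replaces A's online flag state machine (block_type/current_block/paren_depth mutated across one flat for-loop while appending into the dict) with three staged passes: first a cumulative paren-balance prefix array, then span location by the arithmetic condition prefix[k+1]-prefix[i]<=0 with block text taken as a slice lines[i:j+1] (no running depth or accumulated block list), and finally a grouping pass that distributes the collected (type, text) pairs into the dict.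
import Mathlib
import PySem

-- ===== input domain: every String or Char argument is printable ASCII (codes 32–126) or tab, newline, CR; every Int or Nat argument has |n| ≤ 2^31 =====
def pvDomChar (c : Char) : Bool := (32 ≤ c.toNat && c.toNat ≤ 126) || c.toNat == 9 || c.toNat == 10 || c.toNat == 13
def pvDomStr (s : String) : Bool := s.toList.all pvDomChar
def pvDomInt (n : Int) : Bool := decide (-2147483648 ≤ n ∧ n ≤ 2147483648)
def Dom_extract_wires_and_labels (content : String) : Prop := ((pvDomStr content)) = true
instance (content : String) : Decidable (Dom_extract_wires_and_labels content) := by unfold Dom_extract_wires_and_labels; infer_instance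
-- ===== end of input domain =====

-- B replaces A's online flag state machine by three staged passes (paren-balance prefix
-- sums, arithmetic span location with slice-based block text, then a grouping pass);
-- alternative decomposition, same behaviour; return values proved equal.

-- shared helpers: both Pythons use the same type_mapping dict and inner prefix loop
def pvTypeMapping : List (String × String) :=
  [("(wire", "wires"), ("(label", "labels"), ("(global_label", "global_labels"),
   ("(junction", "junctions"), ("(no_connect", "no_connects"), ("(bus ", "bus"),
   ("(bus_entry", "bus_entry"), ("(polyline", "polyline"), ("(text", "text")]

-- the 'for prefix, btype in type_mapping.items(): if stripped.startswith(prefix): … break' loop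
def pvLookupType : List (String × String) → String → Option String
  | [], _ => none
  | (p, bt) :: rest, s => if PySem.Str.startswith s p then some bt else pvLookupType rest s

-- line.count('(') - line.count(')')
def pvDelta (l : String) : Int := (PySem.Str.count l "(" : Int) - (PySem.Str.count l ")" : Int)

-- ===== PORT A =====
def pvInitElements : PySem.Dict String (List String) :=
  PySem.Dict.ofList [("wires", []), ("labels", []), ("global_labels", []),
    ("power_symbols", []), ("junctions", []), ("no_connects", []), ("bus", []),
    ("bus_entry", []), ("polyline", []), ("text", [])]

-- A's loop body, state = ((block_type, current_block, paren_depth), elements)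
def pvStepA (st : (Option String × List String × Int) × PySem.Dict String (List String))
    (line : String) : (Option String × List String × Int) × PySem.Dict String (List String) :=
  match st with
  | ((none, cb, d), el) =>
      match pvLookupType pvTypeMapping (PySem.Str.strip line) with
      | some bt => ((some bt, [line], pvDelta line), el)
      | none => ((none, cb, d), el)
  | ((some bt, cb, d), el) =>
      let cb' := cb ++ [line]
      let d' := d + pvDelta line
      if d' ≤ 0 then
        ((none, [], d'), el.modify bt [] (fun v => v ++ [PySem.Str.join "\n" cb']))
      else
        ((some bt, cb', d'), el)

def extract_wires_and_labels (content : String) : List (String × List String) :=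
  ((((PySem.Str.split? content "\n").getD []).foldl pvStepA ((none, [], 0), pvInitElements)).2).items

-- ===== PORT B =====
def pvOrder : List String :=
  ["wires", "labels", "global_labels", "power_symbols", "junctions",
   "no_connects", "bus", "bus_entry", "polyline", "text"]

-- pass 1: prefix = [0]; total = 0; for line in lines: total += delta; prefix.append(total)
def pvPrefixB (lines : List String) : List Int :=
  (lines.foldl (fun (st : Int × List Int) line =>
    (st.1 + pvDelta line, st.2 ++ [st.1 + pvDelta line])) (0, [0])).2

-- the 'j = None; for k in range(i+1, n): if prefix[k+1] - prefix[i] <= 0: j = k; break' loop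
def pvFindEndB (pre : List Int) (i : Nat) : List Nat → Option Nat
  | [] => none
  | k :: rest =>
      if pre.getD (k + 1) 0 - pre.getD i 0 ≤ 0 then some k else pvFindEndB pre i rest

-- used by pvOuterB's termination: the found j is one of the candidates
theorem pvFindEndB_mem {pre : List Int} {i j : Nat} :
    ∀ {ks : List Nat}, pvFindEndB pre i ks = some j → j ∈ ks := by
  intro ks
  induction ks with
  | nil => intro h; simp [pvFindEndB] at h
  | cons k rest ih =>
    intro h
    rw [pvFindEndB] at h
    split at h
    · simp at h; simp [h]
    · exact List.mem_cons_of_mem _ (ih h)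

set_option maxHeartbeats 1000000 in
-- pass 2: the 'while i < n' span-collecting loop
def pvOuterB (lines : List String) (pre : List Int) (i : Nat)
    (blocks : List (String × String)) : List (String × String) :=
  if h : i < lines.length then
    match pvLookupType pvTypeMapping (PySem.Str.strip lines[i]) with
    | none => pvOuterB lines pre (i + 1) blocks
    | some bt =>
      match hj : pvFindEndB pre i (List.range' (i + 1) (lines.length - (i + 1))) with
      | none => blocks
      | some j =>
          pvOuterB lines pre (j + 1)
            (blocks ++ [(bt, PySem.Str.join "\n"
              (PySem.List.slice lines (some (i : Int)) (some ((j + 1 : Nat) : Int))))])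
  else blocks
termination_by lines.length - i
decreasing_by
  · omega
  · have hm := pvFindEndB_mem hj
    have := List.mem_range'_1.mp hm
    omega

-- pass 3: elements = {k: [] for k in order}; for bt, text in blocks: elements[bt].append(text)
def pvInitB : PySem.Dict String (List String) :=
  pvOrder.foldl (fun d k => d.insert k []) (PySem.Dict.ofList [])

def pvGroupB (blocks : List (String × String)) : PySem.Dict String (List String) :=
  blocks.foldl (fun el p => el.modify p.1 [] (fun v => v ++ [p.2])) pvInitB

def extract_wires_and_labels_alt (content : String) : List (String × List String) :=
  let lines := (PySem.Str.split? content "\n").getD []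
  (pvGroupB (pvOuterB lines (pvPrefixB lines) 0 [])).items

-- ===== PRECONDITION & SPEC =====
def Spec_extract_wires_and_labels (content : String) (out : List (String × List String)) : Prop := out = extract_wires_and_labels_alt content
instance (content : String) (out : List (String × List String)) : Decidable (Spec_extract_wires_and_labels content out) := by unfold Spec_extract_wires_and_labels; infer_instance

-- ===== CLAIM (what is proved, stated in full; the proofs are below) =====
def Claim_equal_extract_wires_and_labels : Prop := ∀ (content : String), Dom_extract_wires_and_labels content → Spec_extract_wires_and_labels content (extract_wires_and_labels content)

-- ===== LEMMAS AND PROOFS =====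

-- proof-only intermediate: the block list A's state machine emits, collected as pairs
mutual
def pvScanP : List String → List (String × String)
  | [] => []
  | line :: rest =>
      match pvLookupType pvTypeMapping (PySem.Str.strip line) with
      | none => pvScanP rest
      | some bt => pvConsumeP bt [line] (pvDelta line) rest
def pvConsumeP (bt : String) (blk : List String) (d : Int) :
    List String → List (String × String)
  | [] => []
  | nxt :: rest =>
      let blk' := blk ++ [nxt]
      let d' := d + pvDelta nxt
      if d' ≤ 0 then (bt, PySem.Str.join "\n" blk') :: pvScanP rest
      else pvConsumeP bt blk' d' rest
end

def pvSumD (L : List String) : Int := (L.map pvDelta).sum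

theorem pvSumD_cons (l : String) (L : List String) :
    pvSumD (l :: L) = pvDelta l + pvSumD L := by simp [pvSumD]

-- A's fold equals folding pvGStep over the collected block list
theorem pvFoldA_eq_blocks (lines : List String) :
    (∀ cb d el, (lines.foldl pvStepA ((none, cb, d), el)).2 = (pvScanP lines).foldl (fun el p => el.modify p.1 [] (fun v => v ++ [p.2])) el) ∧
    (∀ bt blk d el, (lines.foldl pvStepA ((some bt, blk, d), el)).2
        = (pvConsumeP bt blk d lines).foldl (fun el p => el.modify p.1 [] (fun v => v ++ [p.2])) el) := by
  induction lines with
  | nil => exact ⟨fun _ _ _ => rfl, fun _ _ _ _ => rfl⟩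
  | cons l rest ih =>
    constructor
    · intro cb d el
      simp only [List.foldl_cons, pvStepA, pvScanP]
      cases h : pvLookupType pvTypeMapping (PySem.Str.strip l) with
      | none => exact ih.1 cb d el
      | some bt => exact ih.2 bt [l] (pvDelta l) el
    · intro bt blk d el
      simp only [List.foldl_cons, pvStepA, pvConsumeP]
      by_cases h : d + pvDelta l ≤ 0
      · simp only [h, if_pos, List.foldl_cons]
        exact ih.1 [] (d + pvDelta l) _
      · simp only [h, if_neg, not_false_iff]
        exact ih.2 bt (blk ++ [l]) (d + pvDelta l) el

-- pass-1 characterization: the prefix list holds the cumulative balances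
theorem pvPrefix_fold (lines : List String) : ∀ (t : Int) (p : List Int),
    lines.foldl (fun (st : Int × List Int) line =>
      (st.1 + pvDelta line, st.2 ++ [st.1 + pvDelta line])) (t, p)
    = (t + pvSumD lines,
       p ++ (List.range lines.length).map (fun k => t + pvSumD (lines.take (k + 1)))) := by
  induction lines with
  | nil => intro t p; simp [pvSumD]
  | cons l rest ih =>
    intro t p
    simp only [List.foldl_cons]
    rw [ih (t + pvDelta l) (p ++ [t + pvDelta l])]
    simp only [Prod.mk.injEq, List.length_cons]
    refine ⟨by simp [pvSumD_cons]; ring, ?_⟩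
    rw [List.range_succ_eq_map, List.map_cons, List.map_map,
        List.append_assoc, List.singleton_append]
    congr 1
    simp [pvSumD_cons]
    exact ⟨rfl, fun a _ => by ring⟩

theorem pvPrefixB_getD (lines : List String) (m : Nat) (hm : m ≤ lines.length) :
    (pvPrefixB lines).getD m 0 = pvSumD (lines.take m) := by
  unfold pvPrefixB
  rw [pvPrefix_fold]
  cases m with
  | zero => simp [pvSumD]
  | succ k =>
    have hk : k < lines.length := by omega
    simp only [List.singleton_append, List.getD_cons_succ]
    rw [List.getD_eq_getElem _ _ (by simpa using hk)]
    simp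

theorem pvSumD_take_succ (lines : List String) (k : Nat) (hk : k < lines.length) :
    pvSumD (lines.take (k + 1)) = pvSumD (lines.take k) + pvDelta lines[k] := by
  unfold pvSumD
  rw [List.map_take, List.map_take, List.take_add_one, List.getElem?_map,
      List.getElem?_eq_getElem hk]
  simp

theorem pvTake_drop_succ (lines : List String) (i k : Nat) (hik : i ≤ k)
    (hk : k < lines.length) :
    (lines.drop i).take (k - i) ++ [lines[k]] = (lines.drop i).take (k + 1 - i) := by
  have h1 : (lines.drop i).length = lines.length - i := by simp
  have h2 : k - i < (lines.drop i).length := by omega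
  have h3 : (lines.drop i)[k - i] = lines[k] := by
    rw [List.getElem_drop]
    congr 1; omega
  rw [show k + 1 - i = (k - i) + 1 by omega, List.take_add_one,
      List.getElem?_eq_getElem h2, h3]
  simp

-- consume loop ↔ arithmetic span search
theorem pvConsume_eq_find (lines : List String) (i : Nat) (bt : String) (hi : i < lines.length) :
    ∀ (m k : Nat), k ≤ lines.length → i < k → lines.length - k ≤ m →
    pvConsumeP bt ((lines.drop i).take (k - i))
        (pvSumD (lines.take k) - pvSumD (lines.take i)) (lines.drop k)
    = (match pvFindEndB (pvPrefixB lines) i (List.range' k (lines.length - k)) with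
       | some j => (bt, PySem.Str.join "\n" ((lines.drop i).take (j + 1 - i)))
            :: pvScanP (lines.drop (j + 1))
       | none => []) := by
  intro m
  induction m with
  | zero =>
    intro k hkn hik hm
    have hk : k = lines.length := by omega
    subst hk
    simp [pvConsumeP, pvFindEndB]
  | succ m ih =>
    intro k hkn hik hm
    by_cases hk : k < lines.length
    · have hdrop : lines.drop k = lines[k] :: lines.drop (k + 1) :=
        List.drop_eq_getElem_cons hk
      have hrange : List.range' k (lines.length - k)
          = k :: List.range' (k + 1) (lines.length - (k + 1)) := by
        rw [show lines.length - k = (lines.length - (k + 1)) + 1 by omega]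
        exact List.range'_succ
      rw [hdrop, hrange]
      have hcond : (pvPrefixB lines).getD (k + 1) 0 - (pvPrefixB lines).getD i 0
          = pvSumD (lines.take (k + 1)) - pvSumD (lines.take i) := by
        rw [pvPrefixB_getD lines (k + 1) (by omega), pvPrefixB_getD lines i (by omega)]
      have hblk : (lines.drop i).take (k - i) ++ [lines[k]]
          = (lines.drop i).take (k + 1 - i) := pvTake_drop_succ lines i k (by omega) hk
      have hsum : pvSumD (lines.take k) - pvSumD (lines.take i) + pvDelta lines[k]
          = pvSumD (lines.take (k + 1)) - pvSumD (lines.take i) := by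
        rw [pvSumD_take_succ lines k hk]; ring
      simp only [pvConsumeP, pvFindEndB, hcond]
      by_cases hle : pvSumD (lines.take (k + 1)) - pvSumD (lines.take i) ≤ 0
      · rw [if_pos (by rw [hsum]; exact hle), if_pos hle]
        rw [hblk]
      · rw [if_neg (by rw [hsum]; exact hle), if_neg hle]
        rw [hblk, hsum]
        exact ih (k + 1) (by omega) (by omega) (by omega)
    · have hk' : k = lines.length := by omega
      subst hk'
      simp [pvConsumeP, pvFindEndB]

-- outer loop ↔ the state-machine scan
theorem pvOuter_eq_scan (lines : List String) :
    ∀ (m i : Nat) (blocks : List (String × String)), lines.length - i ≤ m →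
    pvOuterB lines (pvPrefixB lines) i blocks = blocks ++ pvScanP (lines.drop i) := by
  intro m
  induction m with
  | zero =>
    intro i blocks hm
    have : lines.length ≤ i := by omega
    rw [pvOuterB, dif_neg (by omega), List.drop_of_length_le this]
    simp [pvScanP]
  | succ m ih =>
    intro i blocks hm
    by_cases hi : i < lines.length
    · have hdrop : lines.drop i = lines[i] :: lines.drop (i + 1) :=
        List.drop_eq_getElem_cons hi
      rw [pvOuterB, dif_pos hi, hdrop]
      cases hlk : pvLookupType pvTypeMapping (PySem.Str.strip lines[i]) with
      | none =>
        rw [ih (i + 1) blocks (by omega)]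
        simp [pvScanP, hlk]
      | some bt =>
        have hscan : pvScanP (lines[i] :: lines.drop (i + 1))
            = pvConsumeP bt [lines[i]] (pvDelta lines[i]) (lines.drop (i + 1)) := by
          simp [pvScanP, hlk]
        rw [hscan]
        have hone : [lines[i]] = (lines.drop i).take (i + 1 - i) := by
          rw [show i + 1 - i = 1 by omega, hdrop]
          rfl
        have hd : pvDelta lines[i]
            = pvSumD (lines.take (i + 1)) - pvSumD (lines.take i) := by
          rw [pvSumD_take_succ lines i hi]; ring
        rw [hone, hd,
          pvConsume_eq_find lines i bt hi lines.length (i + 1) (by omega) (by omega) (by omega)]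
        cases hj : pvFindEndB (pvPrefixB lines) i
            (List.range' (i + 1) (lines.length - (i + 1))) with
        | none => simp
        | some j =>
          have hji : i + 1 ≤ j := (List.mem_range'_1.mp (pvFindEndB_mem hj)).1
          have hslice : PySem.List.slice lines (some (i : Int)) (some ((j + 1 : Nat) : Int))
              = (lines.drop i).take (j + 1 - i) := PySem.List.slice_natCast lines i (j + 1)
          dsimp only
          rw [ih (j + 1) _ (by omega), hslice]
          simp
    · rw [pvOuterB, dif_neg hi, List.drop_of_length_le (by omega)]
      simp [pvScanP]

theorem pvInitB_eq : pvInitB = pvInitElements := by decide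

-- ===== VERDICT (by name: the statement is the Claim_ definition above) =====
theorem extract_wires_and_labels_spec : Claim_equal_extract_wires_and_labels := by
  intro content _
  unfold Spec_extract_wires_and_labels extract_wires_and_labels extract_wires_and_labels_alt
  dsimp only
  rw [(pvFoldA_eq_blocks ((PySem.Str.split? content "\n").getD [])).1]
  unfold pvGroupB
  rw [pvOuter_eq_scan ((PySem.Str.split? content "\n").getD [])
        ((PySem.Str.split? content "\n").getD []).length 0 [] (by omega),
      List.drop_zero, List.nil_append, pvInitB_eq]
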